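-- pv_equiv track=rewrite | github.com/broken-science/Cardboard_MoraJai_Box | source_code/mora_jai_box.py | get_majority
-- ===== SOURCE A (Python) =====
-- def get_majority(fl) :
--   fl.sort()
--   tests = [len(fl), len(set(fl))] # Compare number of entries with number of unique entries.
--   if tests == [2,1] : # 2 neighbours, the same
--     return fl[0]
--   elif tests == [3,1] or tests == [3,2] : # 3 neighbours, all one or two colours.
--     return fl[1]
--   elif tests == [4,1] : # Four neighbours, all one colour.
--     return fl[0]
--   elif tests == [4,2] and fl[1] == fl[2] : # 3 neighbours the same colour, fails if there are 2x2 colours.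
--     return fl[1]
--   elif tests == [4,3] : # 2 neighbours the same but 3 distinct neighbour states
--     cycled = fl[1:] + [fl[0]] # Move first element to last place, the majority tile will overlap.
--     matches = []
--     for (x,y) in zip(fl,cycled) :
--       if x == y :
--         matches.append(x)
--     if matches == [] :
--       matches = ['']
--     return matches[0]
--   else :
--     return ''
-- ===== SOURCE B (Python) =====
-- from collections import Counter
--
-- def get_majority(fl):
--     fl.sort()
--     if not 2 <= len(fl) <= 4:
--         return ''
--     counts = Counter(fl)
--     top = max(counts.values())
--     winners = [c for c, n in counts.items() if n == top]
--     return winners[0] if len(winners) == 1 else ''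
-- ===== Notes on version B (the rewrite author's own statement) =====
-- stated objective: idiomatic
-- what changed: Replaces A's sorted-positional case cascade and cyclic-shift overlap trick with a Counter frequency table: after the in-place sort, a 2-4 tile list returns its unique most-frequent element, or '' on a top-count tie.
import Mathlib
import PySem

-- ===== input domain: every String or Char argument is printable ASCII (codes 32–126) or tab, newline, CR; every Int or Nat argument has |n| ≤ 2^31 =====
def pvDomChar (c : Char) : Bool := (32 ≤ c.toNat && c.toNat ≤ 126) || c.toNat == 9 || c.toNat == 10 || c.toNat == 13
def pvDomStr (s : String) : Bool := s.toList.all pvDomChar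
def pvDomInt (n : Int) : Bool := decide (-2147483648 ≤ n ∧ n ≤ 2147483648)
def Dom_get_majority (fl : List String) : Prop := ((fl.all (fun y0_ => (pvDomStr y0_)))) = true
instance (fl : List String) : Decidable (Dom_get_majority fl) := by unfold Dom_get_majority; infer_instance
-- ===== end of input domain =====

-- B replaces A's sorted-positional case cascade (and its cyclic-shift overlap trick) by a Counter
-- frequency table: the unique most-frequent tile of a 2–4 tile list, '' on ties (more idiomatic, not
-- faster). Equivalence is about the RETURN value; both Pythons also sort the argument in place identically.

-- ===== PORT A =====
def get_majority (fl : List String) : String :=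
  let s := PySem.List.sorted fl (fun x => x) false
  let tests : List Int := [(s.length : Int), ((PySem.Set.ofList s).length : Int)]
  if tests = [2, 1] then (PySem.List.pyGet? s 0).getD ""
  else if tests = [3, 1] ∨ tests = [3, 2] then (PySem.List.pyGet? s 1).getD ""
  else if tests = [4, 1] then (PySem.List.pyGet? s 0).getD ""
  else if tests = [4, 2] ∧ PySem.List.pyGet? s 1 = PySem.List.pyGet? s 2 then
    (PySem.List.pyGet? s 1).getD ""
  else if tests = [4, 3] then
    let cycled := PySem.List.slice s (some 1) none ++ [(PySem.List.pyGet? s 0).getD ""]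
    let ms := (s.zip cycled).foldl (fun acc xy => if xy.1 = xy.2 then acc ++ [xy.1] else acc) []
    let ms := if ms = [] then [""] else ms
    (PySem.List.pyGet? ms 0).getD ""
  else ""

-- ===== PORT B =====
def get_majority_alt (fl : List String) : String :=
  let s := PySem.List.sorted fl (fun x => x) false
  if 2 ≤ s.length ∧ s.length ≤ 4 then
    let counts := PySem.Dict.counter s
    let top := PySem.List.maxD counts.values (fun v => v) 0
    let winners := (counts.items.filter (fun p => p.2 = top)).map (fun p => p.1)
    if winners.length = 1 then (PySem.List.pyGet? winners 0).getD "" else ""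
  else ""

-- ===== PRECONDITION & SPEC =====
def Spec_get_majority (fl : List String) (out : String) : Prop := out = get_majority_alt fl
instance (fl : List String) (out : String) : Decidable (Spec_get_majority fl out) := by unfold Spec_get_majority; infer_instance

-- ===== CLAIM (what is proved, stated in full; the proofs are below) =====
def Claim_equal_get_majority : Prop := ∀ (fl : List String), Dom_get_majority fl → Spec_get_majority fl (get_majority fl)

-- ===== LEMMAS AND PROOFS =====

-- Bodies of the two ports after the common in-place sort, as functions of the sorted list.
def pvABody (s : List String) : String :=
  let tests : List Int := [(s.length : Int), ((PySem.Set.ofList s).length : Int)]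
  if tests = [2, 1] then (PySem.List.pyGet? s 0).getD ""
  else if tests = [3, 1] ∨ tests = [3, 2] then (PySem.List.pyGet? s 1).getD ""
  else if tests = [4, 1] then (PySem.List.pyGet? s 0).getD ""
  else if tests = [4, 2] ∧ PySem.List.pyGet? s 1 = PySem.List.pyGet? s 2 then
    (PySem.List.pyGet? s 1).getD ""
  else if tests = [4, 3] then
    let cycled := PySem.List.slice s (some 1) none ++ [(PySem.List.pyGet? s 0).getD ""]
    let ms := (s.zip cycled).foldl (fun acc xy => if xy.1 = xy.2 then acc ++ [xy.1] else acc) []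
    let ms := if ms = [] then [""] else ms
    (PySem.List.pyGet? ms 0).getD ""
  else ""

def pvBBody (s : List String) : String :=
  if 2 ≤ s.length ∧ s.length ≤ 4 then
    let counts := PySem.Dict.counter s
    let top := PySem.List.maxD counts.values (fun v => v) 0
    let winners := (counts.items.filter (fun p => p.2 = top)).map (fun p => p.1)
    if winners.length = 1 then (PySem.List.pyGet? winners 0).getD "" else ""
  else ""

theorem pvA_eq_body (fl : List String) :
    get_majority fl = pvABody (PySem.List.sorted fl (fun x => x) false) := rfl

theorem pvB_eq_body (fl : List String) :
    get_majority_alt fl = pvBBody (PySem.List.sorted fl (fun x => x) false) := rfl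

theorem pvBody_eq2 (a b : String) : pvABody [a, b] = pvBBody [a, b] := by
  by_cases e1 : a = b
  · subst e1
    simp [pvABody, pvBBody, PySem.Set.ofList, PySem.Set.add, PySem.Dict.counter,
      PySem.Dict.modify, PySem.Dict.insert, PySem.Dict.getD, PySem.Dict.get?,
      PySem.Dict.items, PySem.Dict.values, PySem.Dict.empty,
      PySem.List.maxD, PySem.List.max?, PySem.List.pyGet?, PySem.List.pyIdx?]
  · simp [pvABody, pvBBody, PySem.Set.ofList, PySem.Set.add, PySem.Dict.counter,
      PySem.Dict.modify, PySem.Dict.insert, PySem.Dict.getD, PySem.Dict.get?,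
      PySem.Dict.items, PySem.Dict.values, PySem.Dict.empty,
      PySem.List.maxD, PySem.List.max?, PySem.List.pyGet?, PySem.List.pyIdx?,
      e1, Ne.symm e1]

theorem pvBody_eq3 (a b c : String) (hs : List.Pairwise (· ≤ ·) [a, b, c]) :
    pvABody [a, b, c] = pvBBody [a, b, c] := by
  simp only [List.pairwise_cons, List.mem_cons] at hs
  obtain ⟨h1, h2, -⟩ := hs
  have hab : a ≤ b := h1 b (Or.inl rfl)
  have hbc : b ≤ c := h2 c (Or.inl rfl)
  by_cases e1 : a = b
  · by_cases e2 : b = c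
    · subst e1; subst e2
      simp [pvABody, pvBBody, PySem.Set.ofList, PySem.Set.add, PySem.Dict.counter,
        PySem.Dict.modify, PySem.Dict.insert, PySem.Dict.getD, PySem.Dict.get?,
        PySem.Dict.items, PySem.Dict.values, PySem.Dict.empty,
        PySem.List.maxD, PySem.List.max?, PySem.List.pyGet?, PySem.List.pyIdx?, PySem.List.slice]
    · subst e1
      simp [pvABody, pvBBody, PySem.Set.ofList, PySem.Set.add, PySem.Dict.counter,
        PySem.Dict.modify, PySem.Dict.insert, PySem.Dict.getD, PySem.Dict.get?,
        PySem.Dict.items, PySem.Dict.values, PySem.Dict.empty,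
        PySem.List.maxD, PySem.List.max?, PySem.List.pyGet?, PySem.List.pyIdx?, PySem.List.slice,
        e2, Ne.symm e2]
  · by_cases e2 : b = c
    · subst e2
      simp [pvABody, pvBBody, PySem.Set.ofList, PySem.Set.add, PySem.Dict.counter,
        PySem.Dict.modify, PySem.Dict.insert, PySem.Dict.getD, PySem.Dict.get?,
        PySem.Dict.items, PySem.Dict.values, PySem.Dict.empty,
        PySem.List.maxD, PySem.List.max?, PySem.List.pyGet?, PySem.List.pyIdx?, PySem.List.slice,
        e1, Ne.symm e1]
    · have hac : a ≠ c := ne_of_lt (lt_of_lt_of_le (lt_of_le_of_ne hab e1) hbc)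
      simp [pvABody, pvBBody, PySem.Set.ofList, PySem.Set.add, PySem.Dict.counter,
        PySem.Dict.modify, PySem.Dict.insert, PySem.Dict.getD, PySem.Dict.get?,
        PySem.Dict.items, PySem.Dict.values, PySem.Dict.empty,
        PySem.List.maxD, PySem.List.max?, PySem.List.pyGet?, PySem.List.pyIdx?, PySem.List.slice,
        e1, Ne.symm e1, e2, Ne.symm e2, hac, Ne.symm hac]

theorem pvBody_eq4 (a b c d : String) (hs : List.Pairwise (· ≤ ·) [a, b, c, d]) :
    pvABody [a, b, c, d] = pvBBody [a, b, c, d] := by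
  simp only [List.pairwise_cons, List.mem_cons] at hs
  obtain ⟨h1, h2, h3, -⟩ := hs
  have hab : a ≤ b := h1 b (Or.inl rfl)
  have hbc : b ≤ c := h2 c (Or.inl rfl)
  have hcd : c ≤ d := h3 d (Or.inl rfl)
  by_cases e1 : a = b <;> by_cases e2 : b = c <;> by_cases e3 : c = d
  · subst e1; subst e2; subst e3
    simp [pvABody, pvBBody, PySem.Set.ofList, PySem.Set.add, PySem.Dict.counter,
      PySem.Dict.modify, PySem.Dict.insert, PySem.Dict.getD, PySem.Dict.get?,
      PySem.Dict.items, PySem.Dict.values, PySem.Dict.empty,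
      PySem.List.maxD, PySem.List.max?, PySem.List.pyGet?, PySem.List.pyIdx?, PySem.List.slice]
  · subst e1; subst e2
    simp [pvABody, pvBBody, PySem.Set.ofList, PySem.Set.add, PySem.Dict.counter,
      PySem.Dict.modify, PySem.Dict.insert, PySem.Dict.getD, PySem.Dict.get?,
      PySem.Dict.items, PySem.Dict.values, PySem.Dict.empty,
      PySem.List.maxD, PySem.List.max?, PySem.List.pyGet?, PySem.List.pyIdx?, PySem.List.slice,
      e3, Ne.symm e3]
  · subst e1; subst e3
    simp [pvABody, pvBBody, PySem.Set.ofList, PySem.Set.add, PySem.Dict.counter,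
      PySem.Dict.modify, PySem.Dict.insert, PySem.Dict.getD, PySem.Dict.get?,
      PySem.Dict.items, PySem.Dict.values, PySem.Dict.empty,
      PySem.List.maxD, PySem.List.max?, PySem.List.pyGet?, PySem.List.pyIdx?, PySem.List.slice,
      e2, Ne.symm e2]
  · subst e1
    have had : a ≠ d := ne_of_lt (lt_of_lt_of_le (lt_of_le_of_ne hbc e2) hcd)
    simp [pvABody, pvBBody, PySem.Set.ofList, PySem.Set.add, PySem.Dict.counter,
      PySem.Dict.modify, PySem.Dict.insert, PySem.Dict.getD, PySem.Dict.get?,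
      PySem.Dict.items, PySem.Dict.values, PySem.Dict.empty,
      PySem.List.maxD, PySem.List.max?, PySem.List.pyGet?, PySem.List.pyIdx?, PySem.List.slice,
      e2, Ne.symm e2, e3, Ne.symm e3, had, Ne.symm had]
  · subst e2; subst e3
    simp [pvABody, pvBBody, PySem.Set.ofList, PySem.Set.add, PySem.Dict.counter,
      PySem.Dict.modify, PySem.Dict.insert, PySem.Dict.getD, PySem.Dict.get?,
      PySem.Dict.items, PySem.Dict.values, PySem.Dict.empty,
      PySem.List.maxD, PySem.List.max?, PySem.List.pyGet?, PySem.List.pyIdx?, PySem.List.slice,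
      e1, Ne.symm e1]
  · subst e2
    have had : a ≠ d := ne_of_lt (lt_of_lt_of_le (lt_of_le_of_ne hab e1) hcd)
    simp [pvABody, pvBBody, PySem.Set.ofList, PySem.Set.add, PySem.Dict.counter,
      PySem.Dict.modify, PySem.Dict.insert, PySem.Dict.getD, PySem.Dict.get?,
      PySem.Dict.items, PySem.Dict.values, PySem.Dict.empty,
      PySem.List.maxD, PySem.List.max?, PySem.List.pyGet?, PySem.List.pyIdx?, PySem.List.slice,
      e1, Ne.symm e1, e3, Ne.symm e3, had, Ne.symm had]
  · subst e3
    have hac : a ≠ c := ne_of_lt (lt_of_lt_of_le (lt_of_le_of_ne hab e1) hbc)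
    simp [pvABody, pvBBody, PySem.Set.ofList, PySem.Set.add, PySem.Dict.counter,
      PySem.Dict.modify, PySem.Dict.insert, PySem.Dict.getD, PySem.Dict.get?,
      PySem.Dict.items, PySem.Dict.values, PySem.Dict.empty,
      PySem.List.maxD, PySem.List.max?, PySem.List.pyGet?, PySem.List.pyIdx?, PySem.List.slice,
      e1, Ne.symm e1, e2, Ne.symm e2, hac, Ne.symm hac]
  · have hac : a ≠ c := ne_of_lt (lt_of_lt_of_le (lt_of_le_of_ne hab e1) hbc)
    have hbd : b ≠ d := ne_of_lt (lt_of_lt_of_le (lt_of_le_of_ne hbc e2) hcd)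
    have had : a ≠ d := ne_of_lt (lt_of_le_of_lt hab (lt_of_lt_of_le (lt_of_le_of_ne hbc e2) hcd))
    simp [pvABody, pvBBody, PySem.Set.ofList, PySem.Set.add, PySem.Dict.counter,
      PySem.Dict.modify, PySem.Dict.insert, PySem.Dict.getD, PySem.Dict.get?,
      PySem.Dict.items, PySem.Dict.values, PySem.Dict.empty,
      PySem.List.maxD, PySem.List.max?, PySem.List.pyGet?, PySem.List.pyIdx?, PySem.List.slice,
      e1, Ne.symm e1, e2, Ne.symm e2, e3, Ne.symm e3,
      hac, Ne.symm hac, hbd, Ne.symm hbd, had, Ne.symm had]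

theorem pvBody_eq5 (a b c d e : String) (t : List String) :
    pvABody (a :: b :: c :: d :: e :: t) = pvBBody (a :: b :: c :: d :: e :: t) := by
  have hA2 : ¬ ((t.length : Int) + 1 + 1 + 1 + 1 + 1 = 2) := by omega
  have hA3 : ¬ ((t.length : Int) + 1 + 1 + 1 + 1 + 1 = 3) := by omega
  have hA4 : ¬ ((t.length : Int) + 1 + 1 + 1 + 1 + 1 = 4) := by omega
  simp [pvABody, pvBBody, hA2, hA3, hA4]

theorem pvBody_eq (s : List String) (hs : s.Pairwise (· ≤ ·)) : pvABody s = pvBBody s := by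
  match s, hs with
  | [], _ => decide
  | [a], _ => simp [pvABody, pvBBody]
  | [a, b], _ => exact pvBody_eq2 a b
  | [a, b, c], hs => exact pvBody_eq3 a b c hs
  | [a, b, c, d], hs => exact pvBody_eq4 a b c d hs
  | a :: b :: c :: d :: e :: t, _ => exact pvBody_eq5 a b c d e t

-- ===== VERDICT (by name: the statement is the Claim_ definition above) =====
theorem get_majority_spec : Claim_equal_get_majority := by
  intro fl _
  show get_majority fl = get_majority_alt fl
  rw [pvA_eq_body, pvB_eq_body]
  exact pvBody_eq _ (PySem.List.sorted_pairwise fl (fun x => x))
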